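-- pv_equiv track=rewrite | github.com/Lit-to/atcoder | contest/ABC181/d.py | check
-- ===== SOURCE A (Python) =====
-- from collections import defaultdict,deque
--
-- dict=defaultdict
--
-- def runLengthEncode(s=str or list) -> list:#ランレングス圧縮(エンコード)
--     l=len(s)
--     result=[]
--     if l==0:
--         return result
--     now=[s[0],0]
--     for i in range(l):
--         if s[i]==now[0]:
--             now[1]+=1
--         elif s[i]!=now[0]:#更新
--             result.append(tuple(now))
--             now=[s[i],1]
--     result.append(tuple(now))
--     return result
--
-- def check(content):
--     if len(content)==1:
--         return int(content[0])%8==0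
--     elif len(content)==2:
--         return int(content[0]+content[1])%8==0 or int(content[1]+content[0])%8==0
--     d=dict(lambda:0)
--     for i in content:
--         d[i]+=1
--     for i in range(3-len(content)):
--         d["0"]+=1
--
--     for i in range(1,125):
--         eight=i*8
--         s=str(eight)
--         if 4<len(s):
--             break
--         for j in range(3-len(s)):
--             s="0"+s
--         rl=runLengthEncode(sorted(list(s)))
--         for i in range(len(rl)):
--             if d[rl[i][0]]<rl[i][1]:
--                 break
--         else:
--             return True
--     return False
-- ===== SOURCE B (Python) =====
-- from itertools import permutations
--
-- DIGITS = list("0123456789")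
--
--
-- def check(content):
--     if len(content) == 1:
--         return int(content[0]) % 8 == 0
--     if len(content) == 2:
--         return int(content[0] + content[1]) % 8 == 0 or int(content[1] + content[0]) % 8 == 0
--     digits = [x for x in content if x in DIGITS]
--     pool = []
--     for d in DIGITS:
--         pool += [d] * min(3, digits.count(d))
--     return any(int(a + b + c) % 8 == 0 for a, b, c in permutations(pool, 3))
-- ===== Notes on version B (the rewrite author's own statement) =====
-- stated objective: alternative
-- what changed: A scans the 124 three-digit multiples of 8 and matches each against the input's digit counts via sorting, run-length encoding and a defaultdict frequency table; B goes the opposite way: it collects the digit elements of the input (at most three of each), and tests the digit arrangements enumerated by itertools.permutations directly for divisibility by 8, dropping runLengthEncode, sorting, padding and the frequency dict.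
-- intended difference: On lists with at least three '0' elements and none of '2','4','6','8', A returns False although the digits can be arranged to end in '000', which makes the number divisible by 8; B returns True, the intended answer (A's loop starts at 8 and so never considers the 000 ending). — e.g. on check(["0", "0", "0"]): A returns false, B returns true
import Mathlib
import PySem

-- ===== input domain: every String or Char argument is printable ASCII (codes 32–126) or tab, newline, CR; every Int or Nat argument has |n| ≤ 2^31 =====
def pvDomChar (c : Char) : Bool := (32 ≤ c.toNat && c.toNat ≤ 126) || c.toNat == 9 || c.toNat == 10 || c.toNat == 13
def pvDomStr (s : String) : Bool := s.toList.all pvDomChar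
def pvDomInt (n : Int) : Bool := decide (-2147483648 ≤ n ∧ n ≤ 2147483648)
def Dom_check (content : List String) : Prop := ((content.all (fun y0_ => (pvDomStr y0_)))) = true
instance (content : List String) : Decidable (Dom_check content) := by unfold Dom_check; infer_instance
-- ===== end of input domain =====

-- B replaces A's scan over the three-digit multiples of 8 (each matched against the input's
-- digit counts via sorting, run-length encoding and a defaultdict) by the opposite direction:
-- it collects the available digit elements (at most three of each) and tests the arrangements
-- itertools.permutations offers directly for divisibility by 8; objective: alternative.

-- ===== PORT A =====
-- runLengthEncode(sorted(list(s))): the Python list of 1-char strings is List String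
def runLengthEncode (s : List String) : List (String × Int) :=
  match s with
  | [] => []
  | s0 :: _ =>
    let r := s.foldl (fun (acc : List (String × Int) × (String × Int)) c =>
      if c == acc.2.1 then (acc.1, (acc.2.1, acc.2.2 + 1))
      else (acc.1 ++ [(acc.2.1, acc.2.2)], (c, 1))) ([], (s0, 0))
    r.1 ++ [r.2]

-- the 'for i in range(1,125)' loop: 'break' (when 4 < len(s)) falls out and returns False;
-- the inner for/else over rl is the .all check; Python str s is carried as List Char
def loopA (d : PySem.Dict String Int) : List Int → Bool
  | [] => false
  | i :: rest =>
    let eight := i * 8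
    let s := PySem.Int.toChars eight
    if 4 < (s.length : Int) then false
    else
      let s2 := (PySem.List.pyRange 0 (3 - (s.length : Int)) 1).foldl (fun t _ => '0' :: t) s
      -- sorted(list(s)) sorts 1-char strings; code-point order = Char order, mapped after sorting
      let rl := runLengthEncode ((PySem.List.sorted s2 (fun c => c) false).map (fun c => String.ofList [c]))
      if rl.all (fun p => !(decide (d.getD p.1 0 < p.2))) then true
      else loopA d rest

def check (content : List String) : Bool :=
  if content.length == 1 then
    -- int(content[0]) raises ValueError on non-int strings: excluded by Pre_check
    decide (PySem.Int.mod ((PySem.Int.ofStr? (PySem.List.pyGetD content 0 "")).getD 0) 8 = 0)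
  else if content.length == 2 then
    (decide (PySem.Int.mod ((PySem.Int.ofStr? (PySem.List.pyGetD content 0 "" ++ PySem.List.pyGetD content 1 "")).getD 0) 8 = 0)
     || decide (PySem.Int.mod ((PySem.Int.ofStr? (PySem.List.pyGetD content 1 "" ++ PySem.List.pyGetD content 0 "")).getD 0) 8 = 0))
  else
    let d := content.foldl (fun d i => d.insert i (d.getD i 0 + 1)) PySem.Dict.empty
    let d := (PySem.List.pyRange 0 (3 - (content.length : Int)) 1).foldl
      (fun d _ => d.insert "0" (d.getD "0" 0 + 1)) d
    loopA d (PySem.List.pyRange 1 125 1)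

-- ===== PORT B =====
-- DIGITS = list("0123456789")
def dsList : List String := ["0", "1", "2", "3", "4", "5", "6", "7", "8", "9"]

-- digits = [x for x in content if x in DIGITS]
def digitsOf (content : List String) : List String :=
  content.filter (fun x => dsList.contains x)

-- pool = []; for d in DIGITS: pool += [d] * min(3, digits.count(d))
def poolOf (content : List String) : List String :=
  dsList.foldl (fun pool d => pool ++ List.replicate (min 3 ((digitsOf content).count d)) d) []

def check_alt (content : List String) : Bool :=
  if content.length == 1 then
    decide (PySem.Int.mod ((PySem.Int.ofStr? (PySem.List.pyGetD content 0 "")).getD 0) 8 = 0)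
  else if content.length == 2 then
    (decide (PySem.Int.mod ((PySem.Int.ofStr? (PySem.List.pyGetD content 0 "" ++ PySem.List.pyGetD content 1 "")).getD 0) 8 = 0)
     || decide (PySem.Int.mod ((PySem.Int.ofStr? (PySem.List.pyGetD content 1 "" ++ PySem.List.pyGetD content 0 "")).getD 0) 8 = 0))
  else
    -- any(int(a+b+c) % 8 == 0 for a, b, c in permutations(pool, 3))
    (PySem.List.permutations (poolOf content) 3).any (fun p =>
      match p with
      | [a, b, c] => decide (PySem.Int.mod ((PySem.Int.ofStr? (a ++ b ++ c)).getD 0) 8 = 0)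
      | _ => false)

-- ===== PRECONDITION & SPEC =====
-- Pre_ excludes exactly the inputs on which A raises ValueError: a one-element list whose
-- element int() cannot parse, and a two-element list where int() fails on the first
-- concatenation, or on the second one when the first was parsed but not divisible by 8.
def Pre_check (content : List String) : Prop :=
  (content.length = 1 → (PySem.Int.ofStr? (content.getD 0 "")).isSome = true) ∧
  (content.length = 2 →
    (PySem.Int.ofStr? (content.getD 0 "" ++ content.getD 1 "")).isSome = true ∧
    (PySem.Int.mod ((PySem.Int.ofStr? (content.getD 0 "" ++ content.getD 1 "")).getD 0) 8 = 0 ∨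
     (PySem.Int.ofStr? (content.getD 1 "" ++ content.getD 0 "")).isSome = true))
instance (content : List String) : Decidable (Pre_check content) := by unfold Pre_check; infer_instance
def pvWitness_check : List String := ["1", "6", "9"]

-- On lists with at least three "0" elements and none of "2","4","6","8", A returns False
-- although the digits can be arranged to end in 000, which makes the number divisible by 8;
-- B returns True, the intended answer (A's scan starts at 8 and never considers ending 000).
def D_check (content : List String) : Prop :=
  3 ≤ content.count "0" ∧ content.count "2" = 0 ∧ content.count "4" = 0 ∧
  content.count "6" = 0 ∧ content.count "8" = 0
instance (content : List String) : Decidable (D_check content) := by unfold D_check; infer_instance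

def Spec_check (content : List String) (out : Bool) : Prop := ¬ D_check content → out = check_alt content
instance (content : List String) (out : Bool) : Decidable (Spec_check content out) := by unfold Spec_check; infer_instance

def pvDiffWitness_check : List String := ["0", "0", "0"]
def pvDiffWitnessOut_check : Bool × Bool := (false, true)

-- ===== CLAIM (what is proved, stated in full; the proofs are below) =====
def Claim_unchanged_check : Prop := ∀ (content : List String), Dom_check content → Pre_check content → Spec_check content (check content)
def Claim_changed_check : Prop := Dom_check (pvDiffWitness_check) ∧ Pre_check (pvDiffWitness_check) ∧ D_check (pvDiffWitness_check) ∧ check (pvDiffWitness_check) = pvDiffWitnessOut_check.1 ∧ check_alt (pvDiffWitness_check) = pvDiffWitnessOut_check.2 ∧ pvDiffWitnessOut_check.1 ≠ pvDiffWitnessOut_check.2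
def Claim_exact_check : Prop := ∀ (content : List String), Dom_check content → Pre_check content → D_check content → check content ≠ check_alt content

-- ===== LEMMAS AND PROOFS =====

-- the padded 3-char digit string A builds for the multiple m*8, and its Python list(s) form
def padC (m : Int) : List Char :=
  (PySem.List.pyRange 0 (3 - ((PySem.Int.toChars (m * 8)).length : Int)) 1).foldl
    (fun t _ => '0' :: t) (PySem.Int.toChars (m * 8))
def padS (m : Int) : List String := (padC m).map (fun c => String.ofList [c])
def trip (a b c : Int) : List String := [PySem.Int.toStr a, PySem.Int.toStr b, PySem.Int.toStr c]

-- availability of a 3-element multiset ss among the elements of content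
def FitS (content ss : List String) : Prop :=
  ∀ s ∈ ss, (ss.count s : Int) ≤ (content.count s : Int)

lemma singleton_str_inj {a b : Char} : String.ofList [a] = String.ofList [b] ↔ a = b := by
  rw [String.ofList_inj]; simp

-- loopA never hits the break: every str(i*8) for i in 1..124 has length ≤ 3
set_option maxRecDepth 100000 in
lemma no_break : ∀ i ∈ PySem.List.pyRange 1 125 1, ¬ (4 < ((PySem.Int.toChars (i * 8)).length : Int)) := by
  decide

set_option maxRecDepth 100000 in
lemma len3 : ∀ m ∈ PySem.List.pyRange 1 125 1, (padC m).length = 3 := by decide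

-- the body of A's scan loop at multiple i, with padC abbreviating the padded string
def PA (d : PySem.Dict String Int) (i : Int) : Bool :=
  (runLengthEncode ((PySem.List.sorted (padC i) (fun c => c) false).map (fun c => String.ofList [c]))).all
    (fun p => !(decide (d.getD p.1 0 < p.2)))

lemma loopA_eq_any (d : PySem.Dict String Int) (l : List Int)
    (h : ∀ i ∈ l, ¬ (4 < ((PySem.Int.toChars (i * 8)).length : Int))) :
    loopA d l = l.any (PA d) := by
  induction l with
  | nil => rfl
  | cons i rest ih =>
    have hi := h i (by simp)
    have ht : loopA d (i :: rest) = if PA d i = true then true else loopA d rest := by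
      conv_lhs => rw [loopA]
      rw [if_neg hi]
      rfl
    rw [ht, ih (fun j hj => h j (List.mem_cons_of_mem _ hj)), List.any_cons]
    cases hx : PA d i <;> simp

-- runLengthEncode on an explicit 3-element list
lemma rle_eval3 (x y z : String) :
    runLengthEncode [x, y, z] =
      if x = y then (if y = z then [(x, 3)] else [(x, 2), (z, 1)])
      else (if y = z then [(x, 1), (y, 2)] else [(x, 1), (y, 1), (z, 1)]) := by
  by_cases hxy : x = y <;> by_cases hyz : y = z
  · subst hxy; subst hyz; simp [runLengthEncode]
  · subst hxy
    simp [runLengthEncode, hyz, (show ¬ z = x from fun h => hyz h.symm)]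
  · subst hyz
    simp [runLengthEncode, hxy, (show ¬ y = x from fun h => hxy h.symm)]
  · simp [runLengthEncode, hxy, hyz, (show ¬ y = x from fun h => hxy h.symm),
      (show ¬ z = y from fun h => hyz h.symm)]

-- the inner for/else check on rle(sorted(list(s))) is exactly multiset availability
lemma rle3 (d : PySem.Dict String Int) (cs : List Char) (h : cs.length = 3) :
    ((runLengthEncode ((PySem.List.sorted cs (fun c => c) false).map (fun c => String.ofList [c]))).all
        (fun p => !(decide (d.getD p.1 0 < p.2))) = true)
      ↔ ∀ s ∈ cs.map (fun c => String.ofList [c]),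
          (((cs.map (fun c => String.ofList [c])).count s : Int) ≤ d.getD s 0) := by
  have hperm : (PySem.List.sorted cs (fun c => c) false).Perm cs := PySem.List.sorted_perm cs _ _
  have hpw : (PySem.List.sorted cs (fun c => c) false).Pairwise (fun a b => a ≤ b) :=
    PySem.List.sorted_pairwise cs (fun c => c)
  have hmp : ((PySem.List.sorted cs (fun c => c) false).map (fun c => String.ofList [c])).Perm
      (cs.map fun c => String.ofList [c]) := hperm.map _
  have hR : (∀ s ∈ cs.map (fun c => String.ofList [c]),
        ((cs.map (fun c => String.ofList [c])).count s : Int) ≤ d.getD s 0)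
      ↔ (∀ s ∈ (PySem.List.sorted cs (fun c => c) false).map (fun c => String.ofList [c]),
        (((PySem.List.sorted cs (fun c => c) false).map (fun c => String.ofList [c])).count s : Int) ≤ d.getD s 0) := by
    constructor
    · intro hh s hs
      rw [hmp.count_eq]
      exact hh s (hmp.mem_iff.mp hs)
    · intro hh s hs
      rw [← hmp.count_eq]
      exact hh s (hmp.mem_iff.mpr hs)
  rw [hR]
  have hlen : (PySem.List.sorted cs (fun c => c) false).length = 3 := by
    rw [hperm.length_eq, h]
  rcases hl : PySem.List.sorted cs (fun c => c) false with _ | ⟨a, _ | ⟨b, _ | ⟨c, _ | ⟨x, tl⟩⟩⟩⟩ <;>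
    rw [hl] at hlen <;> simp at hlen
  rw [hl] at hpw
  simp only [List.pairwise_cons, List.mem_cons, List.not_mem_nil] at hpw
  have hab : a ≤ b := hpw.1 b (Or.inl rfl)
  have hac : a ≤ c := hpw.1 c (Or.inr (Or.inl rfl))
  have hbc : b ≤ c := hpw.2.1 c (Or.inl rfl)
  simp only [List.map_cons, List.map_nil]
  rw [rle_eval3]
  by_cases h1 : a = b <;> by_cases h2 : b = c
  · subst h1; subst h2
    rw [if_pos rfl, if_pos rfl]
    constructor
    · intro hh s hs
      simp [List.all_cons, decide_eq_false_iff_not] at hh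
      simp only [List.mem_cons, List.not_mem_nil, or_false] at hs
      rcases hs with rfl | rfl | rfl <;> simp <;> omega
    · intro hh
      have h1 := hh _ (by simp : String.ofList [a] ∈ [String.ofList [a], String.ofList [a], String.ofList [a]])
      simp at h1
      simp [List.all_cons, decide_eq_false_iff_not]
      omega
  · subst h1
    have hk2 : ¬ (String.ofList [a] = String.ofList [c]) := by
      rw [singleton_str_inj]; intro hh; exact h2 hh
    have hk2' : ¬ (String.ofList [c] = String.ofList [a]) := fun hh => hk2 hh.symm
    rw [if_pos rfl, if_neg hk2]
    constructor
    · intro hh s hs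
      simp [List.all_cons, decide_eq_false_iff_not] at hh
      simp only [List.mem_cons, List.not_mem_nil, or_false] at hs
      rcases hs with rfl | rfl | rfl <;> simp [hk2, hk2'] <;> omega
    · intro hh
      have h1 := hh _ (by simp : String.ofList [a] ∈ [String.ofList [a], String.ofList [a], String.ofList [c]])
      have h2' := hh _ (by simp : String.ofList [c] ∈ [String.ofList [a], String.ofList [a], String.ofList [c]])
      simp [hk2, hk2'] at h1 h2'
      simp [List.all_cons, decide_eq_false_iff_not]
      omega
  · subst h2
    have hk1 : ¬ (String.ofList [a] = String.ofList [b]) := by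
      rw [singleton_str_inj]; intro hh; exact h1 hh
    have hk1' : ¬ (String.ofList [b] = String.ofList [a]) := fun hh => hk1 hh.symm
    rw [if_neg hk1, if_pos rfl]
    constructor
    · intro hh s hs
      simp [List.all_cons, decide_eq_false_iff_not] at hh
      simp only [List.mem_cons, List.not_mem_nil, or_false] at hs
      rcases hs with rfl | rfl | rfl <;> simp [hk1, hk1'] <;> omega
    · intro hh
      have ha' := hh _ (by simp : String.ofList [a] ∈ [String.ofList [a], String.ofList [b], String.ofList [b]])
      have hb' := hh _ (by simp : String.ofList [b] ∈ [String.ofList [a], String.ofList [b], String.ofList [b]])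
      simp [hk1, hk1'] at ha' hb'
      simp [List.all_cons, decide_eq_false_iff_not]
      omega
  · have hlt1 : a < b := lt_of_le_of_ne hab h1
    have hlt2 : b < c := lt_of_le_of_ne hbc h2
    have h3 : a ≠ c := ne_of_lt (lt_trans hlt1 hlt2)
    have hk1 : ¬ (String.ofList [a] = String.ofList [b]) := by
      rw [singleton_str_inj]; exact h1
    have hk2 : ¬ (String.ofList [b] = String.ofList [c]) := by
      rw [singleton_str_inj]; exact h2
    have hk3 : ¬ (String.ofList [a] = String.ofList [c]) := by
      rw [singleton_str_inj]; exact h3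
    have hk1' : ¬ (String.ofList [b] = String.ofList [a]) := fun hh => hk1 hh.symm
    have hk2' : ¬ (String.ofList [c] = String.ofList [b]) := fun hh => hk2 hh.symm
    have hk3' : ¬ (String.ofList [c] = String.ofList [a]) := fun hh => hk3 hh.symm
    rw [if_neg hk1, if_neg hk2]
    constructor
    · intro hh s hs
      simp [List.all_cons, decide_eq_false_iff_not] at hh
      simp only [List.mem_cons, List.not_mem_nil, or_false] at hs
      rcases hs with rfl | rfl | rfl <;>
        simp [hk1, hk2, hk3, hk1', hk2', hk3'] <;> omega
    · intro hh
      have ha' := hh _ (by simp : String.ofList [a] ∈ [String.ofList [a], String.ofList [b], String.ofList [c]])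
      have hb' := hh _ (by simp : String.ofList [b] ∈ [String.ofList [a], String.ofList [b], String.ofList [c]])
      have hc' := hh _ (by simp : String.ofList [c] ∈ [String.ofList [a], String.ofList [b], String.ofList [c]])
      simp [hk1, hk2, hk3, hk1', hk2', hk3'] at ha' hb' hc'
      simp [List.all_cons, decide_eq_false_iff_not]
      omega

lemma PA_iff (content : List String) (m : Int) (hm : m ∈ PySem.List.pyRange 1 125 1) :
    PA (PySem.Dict.counter content) m = true ↔ FitS content (padS m) := by
  have h3 := len3 m hm
  rw [PA, rle3 (PySem.Dict.counter content) (padC m) h3]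
  unfold FitS padS
  constructor
  · intro hh s hs
    have := hh s hs
    rwa [PySem.Dict.getD_counter] at this
  · intro hh s hs
    rw [PySem.Dict.getD_counter]
    exact hh s hs

lemma checkA_iff (content : List String) (hn : 3 ≤ content.length) :
    check content = true ↔ ∃ m ∈ PySem.List.pyRange 1 125 1, FitS content (padS m) := by
  have h1 : (content.length == 1) = false := by simp; omega
  have h2 : (content.length == 2) = false := by simp; omega
  have hz : PySem.List.pyRange 0 (3 - (content.length : Int)) 1 = [] :=
    PySem.List.pyRange_one_eq_nil (by omega)
  rw [check, h1, h2]
  simp only [Bool.false_eq_true, if_false, hz, List.foldl_nil,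
    PySem.Dict.foldl_insert_getD_add_one_eq_counter]
  rw [loopA_eq_any _ _ no_break, List.any_eq_true]
  constructor
  · rintro ⟨m, hm, hPA⟩
    exact ⟨m, hm, (PA_iff content m hm).mp hPA⟩
  · rintro ⟨m, hm, hfit⟩
    exact ⟨m, hm, (PA_iff content m hm).mpr hfit⟩

-- ===== B-side characterisation =====

-- completeness of PySem.List.permutations: the step lemma …
lemma mem_perm_succ {α : Type} {xs t : List α} {r : ℕ} (i : ℕ) (hi : i < xs.length)
    (ht : t ∈ PySem.List.permutations (xs.eraseIdx i) r) :
    xs[i] :: t ∈ PySem.List.permutations xs (r + 1) := by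
  rw [PySem.List.permutations]
  simp only [List.mem_flatMap, List.mem_range]
  refine ⟨i, hi, ?_⟩
  simp [List.getElem?_eq_getElem hi]
  exact ht

-- … and the lemma itself: every r-element sub-permutation is enumerated
lemma mem_permutations_of_subperm {α : Type} [DecidableEq α] :
    ∀ (r : ℕ) (xs q : List α), q.length = r → q.Subperm xs →
      q ∈ PySem.List.permutations xs r := by
  intro r
  induction r with
  | zero =>
    intro xs q hl _
    rw [List.length_eq_zero_iff] at hl
    subst hl
    rw [PySem.List.permutations_zero]
    simp
  | succ r ih =>
    intro xs q hl hsub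
    match q with
    | a :: t =>
      have ha : a ∈ xs := hsub.subset (by simp)
      have hi : xs.idxOf a < xs.length := List.idxOf_lt_length_of_mem ha
      have hget : xs[xs.idxOf a] = a := List.getElem_idxOf hi
      have herase : xs.eraseIdx (xs.idxOf a) = xs.erase a :=
        List.eraseIdx_idxOf_eq_erase a xs
      have ht : t.Subperm (xs.erase a) := by
        rw [List.subperm_ext_iff] at hsub ⊢
        intro s hs
        by_cases hsa : s = a
        · subst hsa
          have h1 := hsub s (by simp)
          rw [List.count_erase_self]
          simp at h1
          omega
        · have h1 := hsub s (by simp [hs])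
          rw [List.count_erase_of_ne hsa]
          simp only [List.count_cons] at h1
          rw [if_neg (fun h => hsa ((beq_iff_eq.mp h).symm))] at h1
          omega
      have hmem := ih (xs.erase a) t (by simpa using hl) ht
      have hm := mem_perm_succ (xs.idxOf a) hi (by rwa [herase])
      rwa [hget] at hm

-- every member of permutations xs r is a sub-permutation of xs
lemma subperm_of_mem_permutations {α : Type} {xs p : List α} {r : ℕ}
    (hp : p ∈ PySem.List.permutations xs r) : p.Subperm xs := by
  obtain ⟨-, rest, hperm⟩ := PySem.List.exists_perm_of_mem_permutations r xs p hp
  exact ((List.sublist_append_left p rest).subperm).trans hperm.subperm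

lemma digits_count (content : List String) (d : String) (hd : d ∈ dsList) :
    (digitsOf content).count d = content.count d := by
  unfold digitsOf
  exact List.count_filter (by fin_cases hd <;> rfl)

lemma count_pool (content : List String) (d : String) (hd : d ∈ dsList) :
    (poolOf content).count d = min 3 (content.count d) := by
  rw [← digits_count content d hd]
  fin_cases hd <;>
    simp [poolOf, dsList, List.count_append, List.count_replicate]

lemma mem_pool (content : List String) (s : String) (hs : s ∈ poolOf content) :
    s ∈ dsList := by
  simp only [poolOf, dsList, List.foldl_cons, List.foldl_nil, List.nil_append,
    List.mem_append, List.mem_replicate] at hs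
  simp only [dsList, List.mem_cons, List.not_mem_nil]
  tauto

-- digit tables: dsList.idxOf is the inverse of str() on 0..9
set_option maxRecDepth 100000 in
lemma T1 : ∀ u ∈ dsList, (dsList.idxOf u : Int) ∈ PySem.List.pyRange 0 10 1 ∧
    PySem.Int.toStr ((dsList.idxOf u : Int)) = u := by decide

set_option maxRecDepth 100000 in
lemma T2 : ∀ a ∈ PySem.List.pyRange 0 10 1, PySem.Int.toStr a ∈ dsList ∧
    ((dsList.idxOf (PySem.Int.toStr a) : Int)) = a := by decide

-- int(a+b+c) on three digit strings is the 3-digit value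
set_option maxRecDepth 100000 in
lemma parse3 : ∀ u ∈ dsList, ∀ v ∈ dsList, ∀ w ∈ dsList,
    (PySem.Int.ofStr? (u ++ v ++ w)).getD 0 =
      100 * (dsList.idxOf u : Int) + 10 * (dsList.idxOf v : Int) + (dsList.idxOf w : Int) := by
  decide

lemma checkB_iff (content : List String) (hn : 3 ≤ content.length) :
    check_alt content = true ↔
      ∃ a ∈ PySem.List.pyRange 0 10 1, ∃ b ∈ PySem.List.pyRange 0 10 1, ∃ c ∈ PySem.List.pyRange 0 10 1,
        PySem.Int.mod (100 * a + 10 * b + c) 8 = 0 ∧ FitS content (trip a b c) := by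
  have h1 : (content.length == 1) = false := by simp; omega
  have h2 : (content.length == 2) = false := by simp; omega
  rw [check_alt, h1, h2]
  simp only [Bool.false_eq_true, if_false, List.any_eq_true]
  constructor
  · rintro ⟨p, hp, hval⟩
    have hl := PySem.List.length_of_mem_permutations hp
    have hsub := subperm_of_mem_permutations hp
    rcases p with _ | ⟨u, _ | ⟨v, _ | ⟨w, _ | ⟨x, tl⟩⟩⟩⟩ <;> simp at hl
    have hu : u ∈ dsList := mem_pool content u (hsub.subset (by simp))
    have hv : v ∈ dsList := mem_pool content v (hsub.subset (by simp))
    have hw : w ∈ dsList := mem_pool content w (hsub.subset (by simp))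
    refine ⟨(dsList.idxOf u : Int), (T1 u hu).1, (dsList.idxOf v : Int), (T1 v hv).1,
      (dsList.idxOf w : Int), (T1 w hw).1, ?_, ?_⟩
    · simp only [decide_eq_true_eq] at hval
      rwa [parse3 u hu v hv w hw] at hval
    · unfold FitS trip
      rw [(T1 u hu).2, (T1 v hv).2, (T1 w hw).2]
      intro s hs
      have hsp : s ∈ poolOf content := hsub.subset hs
      have hsd : s ∈ dsList := mem_pool content s hsp
      have hcε : [u, v, w].count s ≤ (poolOf content).count s :=
        List.subperm_ext_iff.mp hsub s hs
      rw [count_pool content s hsd] at hcε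
      have : [u, v, w].count s ≤ content.count s := le_trans hcε (min_le_right _ _)
      exact_mod_cast this
  · rintro ⟨a, ha, b, hb, c, hc, hmod, hfit⟩
    have hu : PySem.Int.toStr a ∈ dsList := (T2 a ha).1
    have hv : PySem.Int.toStr b ∈ dsList := (T2 b hb).1
    have hw : PySem.Int.toStr c ∈ dsList := (T2 c hc).1
    have hq : ([PySem.Int.toStr a, PySem.Int.toStr b, PySem.Int.toStr c] : List String).Subperm (poolOf content) := by
      rw [List.subperm_ext_iff]
      intro s hs
      have hsd : s ∈ dsList := by
        simp only [List.mem_cons, List.not_mem_nil, or_false] at hs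
        rcases hs with rfl | rfl | rfl <;> assumption
      rw [count_pool content s hsd]
      have hle3 : [PySem.Int.toStr a, PySem.Int.toStr b, PySem.Int.toStr c].count s ≤ 3 := by
        have := List.count_le_length (l := [PySem.Int.toStr a, PySem.Int.toStr b, PySem.Int.toStr c]) (a := s)
        simpa using this
      have hlec : ([PySem.Int.toStr a, PySem.Int.toStr b, PySem.Int.toStr c].count s : Int) ≤ (content.count s : Int) :=
        hfit s hs
      omega
    refine ⟨[PySem.Int.toStr a, PySem.Int.toStr b, PySem.Int.toStr c],
      mem_permutations_of_subperm 3 _ _ rfl hq, ?_⟩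
    simp only [decide_eq_true_eq]
    rw [parse3 _ hu _ hv _ hw, (T2 a ha).2, (T2 b hb).2, (T2 c hc).2]
    exact hmod

-- each multiple m*8 (1 ≤ m < 125) is realised by its own padded digit triple
set_option maxRecDepth 100000 in
lemma F1 : ∀ m ∈ PySem.List.pyRange 1 125 1,
    let v := m * 8
    let a := PySem.Int.floordiv v 100
    let b := PySem.Int.mod (PySem.Int.floordiv v 10) 10
    let c := PySem.Int.mod v 10
    a ∈ PySem.List.pyRange 0 10 1 ∧ b ∈ PySem.List.pyRange 0 10 1 ∧ c ∈ PySem.List.pyRange 0 10 1 ∧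
      100 * a + 10 * b + c = v ∧ padS m = trip a b c := by
  decide

-- each digit triple with positive value divisible by 8 is a padded multiple from A's scan
set_option maxRecDepth 100000 in
lemma F2 : ∀ a ∈ PySem.List.pyRange 0 10 1, ∀ b ∈ PySem.List.pyRange 0 10 1, ∀ c ∈ PySem.List.pyRange 0 10 1,
    PySem.Int.mod (100 * a + 10 * b + c) 8 = 0 → 0 < 100 * a + 10 * b + c →
      PySem.Int.floordiv (100 * a + 10 * b + c) 8 ∈ PySem.List.pyRange 1 125 1 ∧
      padS (PySem.Int.floordiv (100 * a + 10 * b + c) 8) = trip a b c := by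
  decide

-- every padded multiple of 8 contains one of the digits 2, 4, 6, 8
set_option maxRecDepth 100000 in
lemma E1 : ∀ m ∈ PySem.List.pyRange 1 125 1,
    ("2" ∈ padS m ∨ "4" ∈ padS m ∨ "6" ∈ padS m ∨ "8" ∈ padS m) := by decide

lemma bridge (content : List String) (hnd : ¬ D_check content) :
    (∃ m ∈ PySem.List.pyRange 1 125 1, FitS content (padS m)) ↔
      (∃ a ∈ PySem.List.pyRange 0 10 1, ∃ b ∈ PySem.List.pyRange 0 10 1, ∃ c ∈ PySem.List.pyRange 0 10 1,
        PySem.Int.mod (100 * a + 10 * b + c) 8 = 0 ∧ FitS content (trip a b c)) := by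
  constructor
  · rintro ⟨m, hm, hfit⟩
    obtain ⟨ha, hb, hc, hv, hps⟩ := F1 m hm
    refine ⟨_, ha, _, hb, _, hc, ?_, ?_⟩
    · rw [hv]
      exact (PySem.Int.mod_eq_zero_iff_dvd _ _).mpr ⟨m, by ring⟩
    · rw [← hps]
      exact hfit
  · rintro ⟨a, ha, b, hb, c, hc, hmod, hfit⟩
    have ha' := PySem.List.mem_pyRange_one.mp ha
    have hb' := PySem.List.mem_pyRange_one.mp hb
    have hc' := PySem.List.mem_pyRange_one.mp hc
    by_cases hv0 : 100 * a + 10 * b + c = 0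
    · have ha0 : a = 0 := by omega
      have hb0 : b = 0 := by omega
      have hc0 : c = 0 := by omega
      subst ha0; subst hb0; subst hc0
      have htrip : trip 0 0 0 = ["0", "0", "0"] := by decide
      have h0 : 3 ≤ content.count "0" := by
        have := hfit "0" (by rw [htrip]; simp)
        rw [htrip] at this
        simp only [show (["0", "0", "0"].count "0") = 3 from by decide] at this
        exact_mod_cast this
      unfold D_check at hnd
      have hev : content.count "2" ≠ 0 ∨ content.count "4" ≠ 0 ∨
          content.count "6" ≠ 0 ∨ content.count "8" ≠ 0 := by
        by_contra hco
        refine hnd ⟨h0, ?_, ?_, ?_, ?_⟩ <;> omega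
      rcases hev with hce | hce | hce | hce
      · refine ⟨25, by decide, ?_⟩
        intro s hs
        rw [show padS 25 = ["2", "0", "0"] from by decide] at hs ⊢
        simp only [List.mem_cons, List.not_mem_nil, or_false] at hs
        rcases hs with rfl | rfl | rfl
        · rw [show (["2", "0", "0"].count "2") = 1 from by decide]; omega
        · rw [show (["2", "0", "0"].count "0") = 2 from by decide]; omega
        · rw [show (["2", "0", "0"].count "0") = 2 from by decide]; omega
      · refine ⟨50, by decide, ?_⟩
        intro s hs
        rw [show padS 50 = ["4", "0", "0"] from by decide] at hs ⊢
        simp only [List.mem_cons, List.not_mem_nil, or_false] at hs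
        rcases hs with rfl | rfl | rfl
        · rw [show (["4", "0", "0"].count "4") = 1 from by decide]; omega
        · rw [show (["4", "0", "0"].count "0") = 2 from by decide]; omega
        · rw [show (["4", "0", "0"].count "0") = 2 from by decide]; omega
      · refine ⟨75, by decide, ?_⟩
        intro s hs
        rw [show padS 75 = ["6", "0", "0"] from by decide] at hs ⊢
        simp only [List.mem_cons, List.not_mem_nil, or_false] at hs
        rcases hs with rfl | rfl | rfl
        · rw [show (["6", "0", "0"].count "6") = 1 from by decide]; omega
        · rw [show (["6", "0", "0"].count "0") = 2 from by decide]; omega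
        · rw [show (["6", "0", "0"].count "0") = 2 from by decide]; omega
      · refine ⟨100, by decide, ?_⟩
        intro s hs
        rw [show padS 100 = ["8", "0", "0"] from by decide] at hs ⊢
        simp only [List.mem_cons, List.not_mem_nil, or_false] at hs
        rcases hs with rfl | rfl | rfl
        · rw [show (["8", "0", "0"].count "8") = 1 from by decide]; omega
        · rw [show (["8", "0", "0"].count "0") = 2 from by decide]; omega
        · rw [show (["8", "0", "0"].count "0") = 2 from by decide]; omega
    · have hvpos : 0 < 100 * a + 10 * b + c := by omega
      obtain ⟨hm, hps⟩ := F2 a ha b hb c hc hmod hvpos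
      refine ⟨_, hm, ?_⟩
      rw [hps]
      exact hfit

lemma main_eq (content : List String) (hn : 3 ≤ content.length) (hnd : ¬ D_check content) :
    check content = check_alt content := by
  rw [Bool.eq_iff_iff, checkA_iff content hn, checkB_iff content hn]
  exact bridge content hnd

-- the empty list: A pads with three "0"s and scans; B has no permutations of 3 — both False
set_option maxRecDepth 1000000 in
set_option maxHeartbeats 2000000 in
lemma nil_eq : check [] = check_alt [] := by rfl

-- the len==1 and len==2 guards are the same code in A and B
lemma single_eq (a : String) : check [a] = check_alt [a] := by
  simp [check, check_alt]
lemma pair_eq (a b : String) : check [a, b] = check_alt [a, b] := by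
  simp [check, check_alt]

-- ===== VERDICT (by name: the statement is the Claim_ definition above) =====
theorem check_spec : Claim_unchanged_check := by
  intro content _ _ hnd
  rcases content with _ | ⟨a, _ | ⟨b, _ | ⟨c, t⟩⟩⟩
  · exact nil_eq
  · exact single_eq a
  · exact pair_eq a b
  · exact main_eq _ (by simp) hnd

set_option maxRecDepth 1000000 in
set_option maxHeartbeats 2000000 in
theorem check_changed : Claim_changed_check := by
  unfold Claim_changed_check
  refine ⟨by decide, by decide, by decide, by rfl, by rfl, by decide⟩

theorem check_tight : Claim_exact_check := by
  intro content _ _ hd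
  obtain ⟨h0, h2, h4, h6, h8⟩ := hd
  have hn : 3 ≤ content.length := le_trans h0 List.count_le_length
  have hA : check content = false := by
    rw [← Bool.not_eq_true, checkA_iff content hn]
    rintro ⟨m, hm, hfit⟩
    rcases E1 m hm with he | he | he | he
    · have h1 := hfit "2" he
      have h2' : 0 < (padS m).count "2" := List.count_pos_iff.mpr he
      omega
    · have h1 := hfit "4" he
      have h2' : 0 < (padS m).count "4" := List.count_pos_iff.mpr he
      omega
    · have h1 := hfit "6" he
      have h2' : 0 < (padS m).count "6" := List.count_pos_iff.mpr he
      omega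
    · have h1 := hfit "8" he
      have h2' : 0 < (padS m).count "8" := List.count_pos_iff.mpr he
      omega
  have hB : check_alt content = true := by
    rw [checkB_iff content hn]
    refine ⟨0, by decide, 0, by decide, 0, by decide, by decide, ?_⟩
    intro s hs
    rw [show trip 0 0 0 = ["0", "0", "0"] from by decide] at hs ⊢
    simp only [List.mem_cons, List.not_mem_nil, or_false] at hs
    rcases hs with rfl | rfl | rfl <;> simp <;> omega
  rw [hA, hB]; simp
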